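-- pv_equiv track=rewrite | github.com/hrseymour/aru | utils/md_utils.py | fix_markdown_tables
-- ===== SOURCE A (Python) =====
-- def fix_markdown_tables(markdown_text):
--     """
--     Fixes improperly formatted markdown tables by adding missing separators
--     and cleaning up formatting issues.
--
--     Args:
--         markdown_text (str): The markdown text to fix
--
--     Returns:
--         str: The fixed markdown text
--     """
--     lines = markdown_text.split('\n')
--     processed_lines = []
--     in_table = False
--     header_row_index = -1
--
--     for i, line in enumerate(lines):
--         # Check if this could be a table row (has multiple pipe characters)
--         if line.count('|') > 2:
--             if not in_table:
--                 in_table = True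
--                 header_row_index = i
--                 # Process as a potential header row
--                 processed_lines.append(line.strip())
--
--                 # Add a separator row if it's missing
--                 if i+1 < len(lines) and '---' not in lines[i+1]:
--                     # Count columns and create separator
--                     cols = max(1, line.count('|') - 1)
--                     separator = '|' + '|'.join(['---'] * cols) + '|'
--                     processed_lines.append(separator)
--             else:
--                 # Process as a normal table row
--                 processed_lines.append(line.strip())
--         else:
--             if in_table:
--                 in_table = False
--             processed_lines.append(line)
--
--     # Join the processed lines back together
--     return '\n'.join(processed_lines)
-- ===== SOURCE B (Python) =====
-- def fix_markdown_tables(markdown_text):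
--     """Run-based rewrite: batch maximal runs of table-looking lines instead of a per-line state machine."""
--     lines = markdown_text.split('\n')
--     n = len(lines)
--     out = []
--     i = 0
--     while i < n:
--         if lines[i].count('|') > 2:
--             # maximal run of table lines starting at i
--             j = i + 1
--             while j < n and lines[j].count('|') > 2:
--                 j += 1
--             header = lines[i]
--             out.append(header.strip())
--             if i + 1 < n and '---' not in lines[i + 1]:
--                 cols = max(1, header.count('|') - 1)
--                 out.append('|' + '|'.join(['---'] * cols) + '|')
--             out.extend(line.strip() for line in lines[i + 1:j])
--             i = j
--         else:
--             out.append(lines[i])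
--             i += 1
--     return '\n'.join(out)
-- ===== Notes on version B (the rewrite author's own statement) =====
-- stated objective: alternative
-- what changed: Replaced A's per-line state machine (in_table flag carried through an enumerate loop) by a two-pointer sweep that batches each maximal run of table-looking lines, emitting the stripped header, the optional separator, and the stripped run body at once.
import Mathlib
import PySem

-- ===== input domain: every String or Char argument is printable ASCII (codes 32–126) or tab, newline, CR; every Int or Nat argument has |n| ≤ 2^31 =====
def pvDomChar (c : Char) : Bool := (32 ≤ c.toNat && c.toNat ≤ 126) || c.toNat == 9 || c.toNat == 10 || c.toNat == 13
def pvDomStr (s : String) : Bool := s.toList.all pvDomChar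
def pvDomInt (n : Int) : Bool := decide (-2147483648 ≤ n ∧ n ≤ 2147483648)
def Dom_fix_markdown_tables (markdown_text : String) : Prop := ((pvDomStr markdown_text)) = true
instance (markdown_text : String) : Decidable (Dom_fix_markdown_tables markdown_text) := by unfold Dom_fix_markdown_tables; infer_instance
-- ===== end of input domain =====

-- B replaces A's per-line in_table state machine by batching maximal runs of table-looking
-- lines with an index-based two-pointer sweep (objective: alternative decomposition, same cost).

-- ===== PORT A =====
-- separator = '|' + '|'.join(['---'] * max(1, line.count('|') - 1)) + '|'
def pvSepA (line : String) : String :=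
  let cols := max 1 (PySem.Str.count line "|" - 1)
  "|" ++ PySem.Str.join "|" (List.replicate cols "---") ++ "|"

def fix_markdown_tables (markdown_text : String) : String :=
  -- lines = markdown_text.split('\n')  (split? with the literal nonempty separator, hence getD)
  let lines := (PySem.Str.split? markdown_text "\n").getD []
  let n : Int := lines.length
  -- state: (processed_lines, in_table, header_row_index)
  let r := (PySem.List.enumerate lines 0).foldl
    (fun (st : List String × Bool × Int) p =>
      let acc := st.1; let in_table := st.2.1; let hdr := st.2.2
      let i := p.1; let line := p.2
      if PySem.Str.count line "|" > 2 then
        if !in_table then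
          let acc := acc ++ [PySem.Str.strip line]
          let acc := if i + 1 < n ∧ ¬ PySem.Str.isIn "---" (PySem.List.pyGetD lines (i + 1) "")
                     then acc ++ [pvSepA line] else acc
          (acc, true, i)
        else
          (acc ++ [PySem.Str.strip line], true, hdr)
      else
        (acc ++ [line], false, hdr))
    ([], false, -1)
  PySem.Str.join "\n" r.1

-- ===== PORT B =====
def pvPipe (l : String) : Bool := PySem.Str.count l "|" > 2

def pvSepB (line : String) : String :=
  let cols := max 1 (PySem.Str.count line "|" - 1)
  "|" ++ PySem.Str.join "|" (List.replicate cols "---") ++ "|"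

-- B's outer while-loop over indices, as recursion on the remaining suffix of lines:
-- a maximal table run is split off with takeWhile/dropWhile (the inner j-scan);
-- a non-table line is emitted unchanged.
def pvGoB : List String → List String
  | [] => []
  | l :: rest =>
    if pvPipe l then
      let body := rest.takeWhile pvPipe
      let after := rest.dropWhile pvPipe
      let sep : List String :=
        match rest with
        | [] => []
        | x :: _ => if PySem.Str.isIn "---" x then [] else [pvSepB l]
      (PySem.Str.strip l :: sep) ++ body.map PySem.Str.strip ++ pvGoB after
    else
      l :: pvGoB rest
termination_by l => l.length
decreasing_by
  · have := List.length_dropWhile_le pvPipe rest; simp; omega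
  · simp

def fix_markdown_tables_alt (markdown_text : String) : String :=
  PySem.Str.join "\n" (pvGoB ((PySem.Str.split? markdown_text "\n").getD []))

-- ===== PRECONDITION & SPEC =====
def Spec_fix_markdown_tables (markdown_text : String) (out : String) : Prop := out = fix_markdown_tables_alt markdown_text
instance (markdown_text : String) (out : String) : Decidable (Spec_fix_markdown_tables markdown_text out) := by unfold Spec_fix_markdown_tables; infer_instance

-- ===== CLAIM (what is proved, stated in full; the proofs are below) =====
def Claim_equal_fix_markdown_tables : Prop := ∀ (markdown_text : String), Dom_fix_markdown_tables markdown_text → Spec_fix_markdown_tables markdown_text (fix_markdown_tables markdown_text)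

-- ===== LEMMAS AND PROOFS =====

-- the separator lines emitted after a header l when the following line is `rest.head?`
def pvSepOf (l : String) (rest : List String) : List String :=
  match rest with
  | [] => []
  | x :: _ => if PySem.Str.isIn "---" x then [] else [pvSepB l]

-- Common specification: process the remaining lines given the current in_table flag.
def pvF : Bool → List String → List String
  | _, [] => []
  | b, l :: rest =>
    if pvPipe l then
      if b then PySem.Str.strip l :: pvF true rest
      else PySem.Str.strip l :: pvSepOf l rest ++ pvF true rest
    else
      l :: pvF false rest

lemma pvF_true_eq (rest : List String) :
    pvF true rest = (rest.takeWhile pvPipe).map PySem.Str.strip ++ pvF false (rest.dropWhile pvPipe) := by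
  induction rest with
  | nil => simp [pvF]
  | cons x r ih =>
    by_cases hx : pvPipe x
    · simp [pvF, hx, ih]
    · simp [pvF, hx]

lemma pvGoB_eq_pvF (xs : List String) : pvGoB xs = pvF false xs := by
  induction xs using pvGoB.induct with
  | case1 => rw [pvGoB.eq_def]; simp [pvF]
  | case2 l rest h _after ih =>
    have ih' : pvGoB (List.dropWhile pvPipe rest) = pvF false (List.dropWhile pvPipe rest) := ih
    rw [pvGoB.eq_def]
    simp only [h, if_true, ih']
    cases rest with
    | nil => simp [pvF, h, pvSepOf]
    | cons x r =>
      rw [List.append_assoc, ← pvF_true_eq]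
      simp [pvF, h, pvSepOf]
  | case3 l rest h ih =>
    rw [pvGoB.eq_def]
    simp only [Bool.not_eq_true] at h
    simp [h, pvF, ih]

lemma pvFoldA (lines : List String) :
    ∀ (suffix : List String) (k : Nat) (acc : List String) (b : Bool) (hd : Int),
    lines.drop k = suffix →
    ((PySem.List.enumerate suffix (k : Int)).foldl
      (fun (st : List String × Bool × Int) p =>
        let acc := st.1; let in_table := st.2.1; let hdr := st.2.2
        let i := p.1; let line := p.2
        if PySem.Str.count line "|" > 2 then
          if !in_table then
            let acc := acc ++ [PySem.Str.strip line]
            let acc := if i + 1 < (lines.length : Int) ∧ ¬ PySem.Str.isIn "---" (PySem.List.pyGetD lines (i + 1) "")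
                       then acc ++ [pvSepA line] else acc
            (acc, true, i)
          else
            (acc ++ [PySem.Str.strip line], true, hdr)
        else
          (acc ++ [line], false, hdr))
      (acc, b, hd)).1 = acc ++ pvF b suffix := by
  intro suffix
  induction suffix with
  | nil => intro k acc b hd _; simp [pvF, PySem.List.enumerate_nil]
  | cons l rest ih =>
    intro k acc b hd hdrop
    have hrest : lines.drop (k + 1) = rest := by
      have h1 : lines.drop (k + 1) = (lines.drop k).drop 1 := by
        rw [List.drop_drop]
      rw [h1, hdrop]; simp
    have h1 : ((k : Int) + 1) = ((k + 1 : Nat) : Int) := by push_cast; ring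
    have hcond : ((k : Int) + 1 < (lines.length : Int) ∧
        ¬ PySem.Str.isIn "---" (PySem.List.pyGetD lines ((k : Int) + 1) "")) ↔
        (rest ≠ [] ∧ ¬ PySem.Str.isIn "---" (rest.headD "")) := by
      cases hr : rest with
      | nil =>
        have hle : lines.length ≤ k + 1 := by
          have h2 := hrest; rw [hr] at h2
          have h3 := List.drop_eq_nil_iff.mp h2
          omega
        constructor
        · rintro ⟨hlt, -⟩; exfalso; omega
        · rintro ⟨hne, -⟩; exact absurd rfl hne
      | cons x r =>
        have hlen : k + 1 < lines.length := by
          by_contra hge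
          have h2 : lines.drop (k + 1) = [] := List.drop_eq_nil_of_le (by omega)
          rw [hrest, hr] at h2; exact absurd h2 (by simp)
        have hget : PySem.List.pyGetD lines ((k : Int) + 1) "" = x := by
          rw [h1, PySem.List.pyGetD_natCast]
          have h3 : lines[k+1]? = some x := by
            rw [List.getElem?_eq_getElem (by omega)]
            have h4 : lines[k+1] = (lines.drop (k+1)).head (by rw [hrest, hr]; simp) := by
              simp
            rw [h4]
            simp only [hrest, hr, List.head_cons]
          simp [h3]
        rw [hget]
        simp only [List.headD_cons, ne_eq, List.cons_ne_nil, not_false_iff, true_and]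
        constructor
        · rintro ⟨-, hno⟩; exact hno
        · intro hno; exact ⟨by omega, hno⟩
    rw [PySem.List.enumerate_cons, List.foldl_cons]
    by_cases hp : PySem.Str.count l "|" > 2
    · have hpb : pvPipe l = true := by simp only [pvPipe]; exact decide_eq_true hp
      cases b with
      | false =>
        dsimp only
        rw [if_pos hp]
        simp only [Bool.not_false, if_true]
        by_cases hc : ((k : Int) + 1 < (lines.length : Int) ∧
            ¬ PySem.Str.isIn "---" (PySem.List.pyGetD lines ((k : Int) + 1) ""))
        · rw [if_pos hc, h1, ih (k+1) _ true _ hrest]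
          have hsep : pvSepOf l rest = [pvSepA l] := by
            obtain ⟨hne, hno⟩ := hcond.mp hc
            cases hr : rest with
            | nil => rw [hr] at hne; exact absurd rfl hne
            | cons x r =>
              rw [hr] at hno
              simp only [List.headD_cons] at hno
              simp only [pvSepOf]
              rw [if_neg hno]
              rfl
          simp [pvF, hpb, hsep]
        · rw [if_neg hc, h1, ih (k+1) _ true _ hrest]
          have hsep : pvSepOf l rest = [] := by
            cases hr : rest with
            | nil => rfl
            | cons x r =>
              have hno : ¬ ¬ PySem.Str.isIn "---" x = true := by
                intro hx
                exact hc (hcond.mpr ⟨by rw [hr]; simp, by rw [hr]; simpa using hx⟩)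
              simp only [pvSepOf]
              rw [if_pos (by simpa using hno)]
          simp [pvF, hpb, hsep]
      | true =>
        dsimp only
        rw [if_pos hp]
        simp only [Bool.not_true, Bool.false_eq_true, if_false]
        rw [h1, ih (k+1) _ true _ hrest]
        simp [pvF, hpb]
    · have hpb : pvPipe l = false := by simp only [pvPipe]; exact decide_eq_false hp
      dsimp only
      rw [if_neg hp, h1, ih (k+1) _ false _ hrest]
      simp [pvF, hpb]

-- ===== VERDICT (by name: the statement is the Claim_ definition above) =====
theorem fix_markdown_tables_spec : Claim_equal_fix_markdown_tables := by
  intro s _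
  unfold Spec_fix_markdown_tables fix_markdown_tables fix_markdown_tables_alt
  dsimp only
  rw [pvGoB_eq_pvF]
  have h := pvFoldA ((PySem.Str.split? s "\n").getD []) ((PySem.Str.split? s "\n").getD []) 0 [] false (-1) (by simp)
  simp only [Nat.cast_zero] at h
  rw [h]
  simp
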